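-- pv_equiv track=rewrite | github.com/MrBrantCode/unitest_baseline | mut_generate/mist_train_cf/cf_18266/solution.py | count_prime_pairs
-- ===== SOURCE A (Python) =====
-- def count_prime_pairs(nums):
--     def is_prime(n):
--         """Check if a number is prime."""
--         if n < 2:
--             return False
--         for i in range(2, int(n**0.5) + 1):
--             if n % i == 0:
--                 return False
--         return True
--
--     count = 0
--     n = len(nums)
--     for i in range(n - 1):
--         for j in range(i + 1, n):
--             if is_prime(abs(nums[i] - nums[j])):
--                 count += 1
--     return count
-- ===== SOURCE B (Python) =====
-- def count_prime_pairs(nums):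
--     def is_prime(n):
--         """Check if a number is prime."""
--         if n < 2:
--             return False
--         for i in range(2, int(n**0.5) + 1):
--             if n % i == 0:
--                 return False
--         return True
--
--     freq = {}
--     for v in nums:
--         freq[v] = freq.get(v, 0) + 1
--     items = list(freq.items())
--     total = 0
--     for idx, (v, c) in enumerate(items):
--         for (w, d) in items[idx + 1:]:
--             if is_prime(abs(v - w)):
--                 total += c * d
--     return total
-- ===== Notes on version B (the rewrite author's own statement) =====
-- stated objective: alternative
-- what changed: B builds a frequency map of the values once and sums count[v]*count[w] over unordered pairs of distinct values whose difference is prime, instead of scanning all index pairs; equal values contribute nothing since is_prime(0) is False.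
import Mathlib
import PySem

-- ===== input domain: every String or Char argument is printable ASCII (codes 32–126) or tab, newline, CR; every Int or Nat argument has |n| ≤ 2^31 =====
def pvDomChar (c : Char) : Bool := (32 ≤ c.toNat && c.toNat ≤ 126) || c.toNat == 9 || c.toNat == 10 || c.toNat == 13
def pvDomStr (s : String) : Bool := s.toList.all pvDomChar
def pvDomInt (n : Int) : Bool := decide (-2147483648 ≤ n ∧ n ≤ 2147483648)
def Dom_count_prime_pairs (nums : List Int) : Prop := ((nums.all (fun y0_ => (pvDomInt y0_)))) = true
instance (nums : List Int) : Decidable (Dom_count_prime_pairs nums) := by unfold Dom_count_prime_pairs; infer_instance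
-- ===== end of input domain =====

-- B re-implements the count via a frequency map over distinct values; same results, no speed claim.

-- ===== PORT A =====
-- helper shared by both ports: both Pythons contain the identical nested `is_prime`.
-- `int(n**0.5)` is ported as Nat.sqrt, exact here: is_prime is only called on |x - y| with
-- |x|,|y| ≤ 2^31 (Dom), so 0 ≤ n ≤ 2^32 and the double sqrt truncates to the integer sqrt.
-- The early-return trial-division loop is `List.all` over the same range.
def pvIsPrime (n : Int) : Bool :=
  if n < 2 then false
  else (PySem.List.pyRange 2 ((Nat.sqrt n.toNat : Int) + 1) 1).all
    (fun i => !(PySem.Int.mod n i == 0))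

def count_prime_pairs (nums : List Int) : Int :=
  let n : Int := nums.length
  (PySem.List.pyRange 0 (n - 1) 1).foldl (fun count i =>
    (PySem.List.pyRange (i + 1) n 1).foldl (fun count j =>
      if pvIsPrime |PySem.List.pyGetD nums i 0 - PySem.List.pyGetD nums j 0| then count + 1
      else count) count) 0

-- ===== PORT B =====
-- `for idx, (v, c) in enumerate(items): for (w, d) in items[idx+1:]: …` as the obvious
-- structural recursion: at each element the inner loop runs over the rest of the list.
def pvPairLoop : List (Int × Int) → Int → Int
  | [], total => total
  | (v, c) :: rest, total =>
      pvPairLoop rest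
        (rest.foldl (fun t wd => if pvIsPrime |v - wd.1| then t + c * wd.2 else t) total)

def count_prime_pairs_alt (nums : List Int) : Int :=
  let freq := nums.foldl (fun d v => d.insert v (d.getD v 0 + 1)) PySem.Dict.empty
  pvPairLoop freq.items 0

-- ===== PRECONDITION & SPEC =====
def Spec_count_prime_pairs (nums : List Int) (out : Int) : Prop := out = count_prime_pairs_alt nums
instance (nums : List Int) (out : Int) : Decidable (Spec_count_prime_pairs nums out) := by unfold Spec_count_prime_pairs; infer_instance

-- ===== CLAIM (what is proved, stated in full; the proofs are below) =====
def Claim_equal_count_prime_pairs : Prop := ∀ (nums : List Int), Dom_count_prime_pairs nums → Spec_count_prime_pairs nums (count_prime_pairs nums)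

-- ===== LEMMAS AND PROOFS =====

-- 0/1 indicator of "the pair of values counts"
def pvF (x y : Int) : Int := if pvIsPrime |x - y| then 1 else 0

-- weighted indicator on (value, multiplicity) pairs
def pvG (p q : Int × Int) : Int := p.2 * q.2 * pvF p.1 q.1

-- triangular sum Σ_{i<j} f l[i] l[j], structurally
def pvTri {α : Type} (f : α → α → Int) : List α → Int
  | [] => 0
  | x :: r => (r.map (f x)).sum + pvTri f r

-- full square sum Σ_{x∈l} Σ_{y∈l} f x y
def pvSq {α : Type} (f : α → α → Int) (l : List α) : Int :=
  (l.map (fun x => (l.map (f x)).sum)).sum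

theorem pvF_symm (x y : Int) : pvF x y = pvF y x := by
  simp [pvF, abs_sub_comm]

theorem pvF_diag (x : Int) : pvF x x = 0 := by
  simp [pvF, pvIsPrime]

theorem pvG_symm (p q : Int × Int) : pvG p q = pvG q p := by
  simp only [pvG, pvF_symm]; ring

theorem pvG_diag (p : Int × Int) : pvG p p = 0 := by
  simp [pvG, pvF_diag]

theorem pvTri_two {α : Type} (f : α → α → Int)
    (hs : ∀ x y, f x y = f y x) (hd : ∀ x, f x x = 0) :
    ∀ l : List α, 2 * pvTri f l = pvSq f l := by
  intro l
  induction l with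
  | nil => simp [pvTri, pvSq]
  | cons x r ih =>
    simp only [pvTri, pvSq, List.map_cons, List.sum_cons, hd]
    have h2 : (r.map (fun z => f z x + (r.map (f z)).sum)).sum
        = (r.map (f x)).sum + (r.map (fun z => (r.map (f z)).sum)).sum := by
      rw [PySem.List.sum_map_add_int]
      congr 2
      exact List.map_congr_left (fun z _ => hs z x)
    rw [h2]
    unfold pvSq at ih
    omega

-- on a nodup list containing x, the sum of "g at x, else 0" is g x
theorem pvSumIte {α : Type} [DecidableEq α] (g : α → Int) (x : α) :
    ∀ K : List α, K.Nodup → x ∈ K →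
      (K.map (fun k => if k = x then g k else 0)).sum = g x := by
  intro K
  induction K with
  | nil => intro _ h; cases h
  | cons y t ih =>
    intro hnd hx
    rcases List.nodup_cons.mp hnd with ⟨hyt, hnt⟩
    by_cases h : y = x
    · subst h
      have : (t.map (fun k => if k = y then g k else 0)).sum = 0 := by
        apply List.sum_eq_zero
        intro z hz
        rcases List.mem_map.mp hz with ⟨k, hk, rfl⟩
        have : k ≠ y := fun e => hyt (e ▸ hk)
        simp [this]
      simp [this]
    · have hx' : x ∈ t := by
        rcases List.mem_cons.mp hx with h' | h'
        · exact absurd h'.symm h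
        · exact h'
      simp [h, ih hnt hx']

-- sum over a list = sum over a superset key list weighted by multiplicities
theorem pvGroup {α : Type} [DecidableEq α] (K : List α) (hK : K.Nodup) :
    ∀ (l : List α), (∀ x ∈ l, x ∈ K) → ∀ (g : α → Int),
      (l.map g).sum = (K.map (fun k => (l.count k : Int) * g k)).sum := by
  intro l
  induction l with
  | nil =>
    intro _ g
    simp
  | cons a r ihl =>
    intro hsub g
    have hr := ihl (fun x hx => hsub x (List.mem_cons_of_mem _ hx)) g
    have hsplit : (K.map (fun k => (((a :: r).count k : Nat) : Int) * g k)).sum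
        = (K.map (fun k => (r.count k : Int) * g k)).sum
          + (K.map (fun k => if k = a then g k else 0)).sum := by
      rw [← PySem.List.sum_map_add_int]
      apply congrArg
      apply List.map_congr_left
      intro k _
      by_cases h : k = a
      · subst h; simp; ring
      · simp [h, Ne.symm h]
    simp only [List.map_cons, List.sum_cons]
    rw [hsplit, pvSumIte g a K hK (hsub a (List.mem_cons_self ..)), hr]
    omega

-- the outer index loop of A, written as a sum of per-row sums, is the triangular sum
theorem pvA_sum : ∀ (nums : List Int),
    ((PySem.List.pyRange 0 ((nums.length : Int) - 1) 1).map
      (fun i => ((nums.drop (i + 1).toNat).map (pvF (PySem.List.pyGetD nums i 0))).sum)).sum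
    = pvTri pvF nums := by
  intro nums
  induction nums with
  | nil => simp [PySem.List.pyRange_one_eq_nil, pvTri]
  | cons x r ih =>
    rcases r with _ | ⟨y, t⟩
    · simp [pvTri, PySem.List.pyRange_one_eq_nil]
    · set r := y :: t with hr
      have hlen : ((x :: r).length : Int) - 1 = (r.length : Int) := by
        simp
      have hpos : (0 : Int) < (r.length : Int) := by
        rw [hr]; simp
      rw [hlen, PySem.List.pyRange_one_cons hpos]
      simp only [List.map_cons, List.sum_cons, zero_add]
      have hhead : (((x :: r).drop ((1 : Int)).toNat).map
          (pvF (PySem.List.pyGetD (x :: r) 0 0))).sum = (r.map (pvF x)).sum := by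
        simp [PySem.List.pyGetD_zero_cons]
      have htail : ((PySem.List.pyRange 1 (r.length : Int) 1).map
          (fun i => (((x :: r).drop (i + 1).toNat).map (pvF (PySem.List.pyGetD (x :: r) i 0))).sum)).sum
          = ((PySem.List.pyRange 0 ((r.length : Int) - 1) 1).map
          (fun i => ((r.drop (i + 1).toNat).map (pvF (PySem.List.pyGetD r i 0))).sum)).sum := by
        rw [PySem.List.pyRange_one, PySem.List.pyRange_one, List.map_map, List.map_map]
        simp only [sub_zero]
        apply congrArg
        apply List.map_congr_left
        intro k _
        have e1 : ((1 + (k : Int)) + 1).toNat = k + 2 := by omega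
        have e2 : ((k : Int) + 1).toNat = k + 1 := by omega
        have e3 : PySem.List.pyGetD (x :: r) (1 + (k : Int)) 0 = PySem.List.pyGetD r (k : Int) 0 := by
          have : (1 + (k : Int)) = ((k + 1 : Nat) : Int) := by omega
          rw [this, PySem.List.pyGetD_natCast, PySem.List.pyGetD_natCast]
          simp
        simp only [Function.comp, zero_add, e1, e2, e3]
        rw [show k + 2 = k + 1 + 1 from rfl, List.drop_succ_cons]
      rw [hhead, htail, ih]
      simp [pvTri]

theorem pvA_eq (nums : List Int) : count_prime_pairs nums = pvTri pvF nums := by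
  unfold count_prime_pairs
  have hstep : (PySem.List.pyRange 0 ((nums.length : Int) - 1) 1).foldl
      (fun count i =>
        (PySem.List.pyRange (i + 1) (nums.length : Int) 1).foldl (fun count j =>
          if pvIsPrime |PySem.List.pyGetD nums i 0 - PySem.List.pyGetD nums j 0| then count + 1
          else count) count) 0
      = (PySem.List.pyRange 0 ((nums.length : Int) - 1) 1).foldl
      (fun count i =>
        count + ((nums.drop (i + 1).toNat).map (pvF (PySem.List.pyGetD nums i 0))).sum) 0 := by
    apply PySem.List.foldl_congr_mem
    intro acc i hi
    have h0i : (0 : Int) ≤ i := ((PySem.List.mem_pyRange_one).mp hi).1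
    rw [PySem.List.foldl_pyRange_pyGetD' nums 0
      (f := fun count y =>
        if pvIsPrime |PySem.List.pyGetD nums i 0 - y| then count + 1 else count)
      (a := i + 1) acc (by omega),
      PySem.List.foldl_if_add_one]
    congr 1
    unfold pvF
    rw [PySem.List.sum_map_ite_one_zero]
  rw [hstep, PySem.List.foldl_add (g := fun i =>
      ((nums.drop (i + 1).toNat).map (pvF (PySem.List.pyGetD nums i 0))).sum)]
  rw [pvA_sum]
  omega

theorem pvPairLoop_eq (l : List (Int × Int)) : ∀ t, pvPairLoop l t = t + pvTri pvG l := by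
  induction l with
  | nil => intro t; simp [pvPairLoop, pvTri]
  | cons p rest ih =>
    intro t
    rcases p with ⟨v, c⟩
    have hbody : rest.foldl
        (fun t wd => if pvIsPrime |v - wd.1| then t + c * wd.2 else t) t
        = rest.foldl (fun t wd => t + pvG (v, c) wd) t := by
      apply PySem.List.foldl_congr_mem
      intro acc wd _
      by_cases h : pvIsPrime |v - wd.1| <;> simp [pvG, pvF, h]
    rw [pvPairLoop, hbody, PySem.List.foldl_add (g := pvG (v, c)), ih]
    simp [pvTri]
    omega

theorem pvB_eq (nums : List Int) :
    count_prime_pairs_alt nums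
      = pvTri pvG ((PySem.Set.ofList nums).map (fun k => (k, (nums.count k : Int)))) := by
  have h0 : count_prime_pairs_alt nums = pvPairLoop (PySem.Dict.counter nums).items 0 := rfl
  rw [h0, PySem.Dict.items_counter, pvPairLoop_eq]
  omega

theorem pvSq_group (nums : List Int) :
    pvSq pvF nums
      = pvSq pvG ((PySem.Set.ofList nums).map (fun k => (k, (nums.count k : Int)))) := by
  have hK : (PySem.Set.ofList nums).Nodup := PySem.Set.nodup_ofList nums
  have hsub : ∀ x ∈ nums, x ∈ PySem.Set.ofList nums := by
    intro x hx; exact (PySem.Set.mem_ofList nums x).mpr hx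
  unfold pvSq
  have hinner : (nums.map (fun x => (nums.map (pvF x)).sum))
      = nums.map (fun x =>
          ((PySem.Set.ofList nums).map (fun w => (nums.count w : Int) * pvF x w)).sum) := by
    apply List.map_congr_left
    intro x _
    exact pvGroup _ hK nums hsub (pvF x)
  rw [hinner, pvGroup _ hK nums hsub
    (fun x => ((PySem.Set.ofList nums).map (fun w => (nums.count w : Int) * pvF x w)).sum)]
  rw [List.map_map]
  apply congrArg
  apply List.map_congr_left
  intro v _
  simp only [Function.comp_apply]
  rw [List.map_map, ← List.sum_map_mul_left]
  apply congrArg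
  apply List.map_congr_left
  intro w _
  simp only [Function.comp_apply, pvG]
  ring

-- ===== VERDICT (by name: the statement is the Claim_ definition above) =====
theorem count_prime_pairs_spec : Claim_equal_count_prime_pairs := by
  intro nums _
  unfold Spec_count_prime_pairs
  have h2 : 2 * count_prime_pairs nums = 2 * count_prime_pairs_alt nums := by
    rw [pvA_eq, pvB_eq, pvTri_two pvF pvF_symm pvF_diag, pvTri_two pvG pvG_symm pvG_diag,
      pvSq_group]
  omega
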